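-- pv_equiv track=rewrite | github.com/SatoMichi/Mahjong_in_Python | JudgeRon.py | yiqiguantong
-- ===== SOURCE A (Python) =====
-- def yiqiguantong(hand,openHand):
--     hand_no = pai2onlyno(hand)
--     openHand_no = pai2onlyno(openHand)
--     for i in range(3):
--         ron_judge = [[0+i*9,1+i*9,2+i*9],[3+i*9,4+i*9,5+i*9],[6+i*9,7+i*9,8+i*9]]
--         ron = [False,False,False]
--         for j,r in enumerate(ron_judge):
--             if(r in hand_no or r in openHand_no):
--                 ron[j] = True
--         if(not False in ron):
--             return True
--     return False
--
-- def pai2onlyno(hand):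
--     honlyno = []
--     for h in hand:
--         if(len(h)==4):
--             new_h = [h[0][0],h[1][0],h[2][0],h[3][0]]
--         elif(len(h)==3):
--             new_h = [h[0][0],h[1][0],h[2][0]]
--         elif(len(h)==2):
--             new_h = [h[0][0],h[1][0]]
--         else:
--             new_h = [h[0][0]]
--         honlyno.append(new_h)
--     return honlyno
-- ===== SOURCE B (Python) =====
-- def yiqiguantong(hand, openHand):
--     # Single pass over the melds accumulating a 9-bit mask (bit k = run starting
--     # at tile 3k present), then an arithmetic check of each suit's 3-bit field.
--     mask = 0
--     for h in hand:
--         mask |= _run_bit(h)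
--     for h in openHand:
--         mask |= _run_bit(h)
--     return any((mask >> 3 * i) & 7 == 7 for i in range(3))
--
-- def _run_bit(h):
--     if len(h) != 3:
--         return 0
--     a = h[0][0]
--     if 0 <= a <= 24 and a % 3 == 0 and h[1][0] == a + 1 and h[2][0] == a + 2:
--         return 1 << (a // 3)
--     return 0
-- ===== Notes on version B (the rewrite author's own statement) =====
-- stated objective: alternative
-- what changed: A converts both hands with pai2onlyno and then, for each suit and each of its 3 target triples, rescans the converted meld lists for an equal list; B never builds those lists or the 9 target triples: it makes one pass over the raw melds, classifies each 3-tile meld arithmetically as one of the canonical runs, ORs a bit per run into a single 9-bit integer mask, and decides the result by testing each suit's 3-bit field of the mask.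
import Mathlib
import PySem

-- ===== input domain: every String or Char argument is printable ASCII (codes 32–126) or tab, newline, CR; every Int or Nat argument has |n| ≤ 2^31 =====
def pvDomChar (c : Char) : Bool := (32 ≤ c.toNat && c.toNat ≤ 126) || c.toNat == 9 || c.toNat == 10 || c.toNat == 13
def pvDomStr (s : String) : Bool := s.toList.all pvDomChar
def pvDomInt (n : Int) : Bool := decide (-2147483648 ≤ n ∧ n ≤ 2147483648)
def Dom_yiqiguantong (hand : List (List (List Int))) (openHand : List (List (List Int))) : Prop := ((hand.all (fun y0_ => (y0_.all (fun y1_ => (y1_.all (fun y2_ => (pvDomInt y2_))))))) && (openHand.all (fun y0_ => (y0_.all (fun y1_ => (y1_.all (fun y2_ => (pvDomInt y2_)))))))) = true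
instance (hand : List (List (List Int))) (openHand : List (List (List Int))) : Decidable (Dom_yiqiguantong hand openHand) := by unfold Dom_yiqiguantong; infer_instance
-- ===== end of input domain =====

-- B replaces A's suits×triples loop (which rescans both converted meld lists for each of 9 runs)
-- by a single pass over the melds accumulating a 9-bit integer mask, followed by an arithmetic
-- per-suit check of the mask; return-value equivalence only (neither mutates its arguments).


-- ===== PORT A =====
-- h[k][0] in total form: the getD defaults are only reachable outside Pre_, where the Python raises
def pvAt (h : List (List Int)) (k : Nat) : Int := (h.getD k []).getD 0 0

def pai2onlyno (hand : List (List (List Int))) : List (List Int) :=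
  hand.foldl (fun honlyno h =>
    let new_h :=
      if h.length == 4 then [pvAt h 0, pvAt h 1, pvAt h 2, pvAt h 3]
      else if h.length == 3 then [pvAt h 0, pvAt h 1, pvAt h 2]
      else if h.length == 2 then [pvAt h 0, pvAt h 1]
      else [pvAt h 0]
    honlyno ++ [new_h]) []

def pvRonLoop (hand_no open_no : List (List Int)) : List Int → Bool
  | [] => false
  | i :: rest =>
      let ron_judge := [[0+i*9,1+i*9,2+i*9],[3+i*9,4+i*9,5+i*9],[6+i*9,7+i*9,8+i*9]]
      let ron := (PySem.List.enumerate ron_judge).foldl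
        (fun ron jr =>
          if hand_no.contains jr.2 || open_no.contains jr.2 then PySem.List.pySetD ron jr.1 true
          else ron)
        [false, false, false]
      if !(ron.contains false) then true else pvRonLoop hand_no open_no rest

def yiqiguantong (hand : List (List (List Int))) (openHand : List (List (List Int))) : Bool :=
  let hand_no := pai2onlyno hand
  let openHand_no := pai2onlyno openHand
  pvRonLoop hand_no openHand_no (PySem.List.pyRange 0 3 1)

-- ===== PORT B =====
-- _run_bit: the run-bit of one meld. '1 << (a//3)' is ported as '(1:Int) <<< (a//3).toNat';
-- the guard forces 0 ≤ a//3, so .toNat is exact there.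
def pvRunBit (h : List (List Int)) : Int :=
  if h.length == 3 then
    if decide (0 ≤ pvAt h 0) && decide (pvAt h 0 ≤ 24) && (PySem.Int.mod (pvAt h 0) 3 == 0)
        && (pvAt h 1 == pvAt h 0 + 1) && (pvAt h 2 == pvAt h 0 + 2) then
      (1 : Int) <<< (PySem.Int.floordiv (pvAt h 0) 3).toNat
    else 0
  else 0

-- 'mask >> 3*i' is ported as 'mask >>> (3*i).toNat'; i ranges over pyRange 0 3 1, so 3*i ≥ 0
-- and .toNat is exact; 'mask & 7' is Int.land mask 7, 'mask |= bit' is Int.lor.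
def yiqiguantong_alt (hand : List (List (List Int))) (openHand : List (List (List Int))) : Bool :=
  let mask0 := hand.foldl (fun m h => Int.lor m (pvRunBit h)) 0
  let mask := openHand.foldl (fun m h => Int.lor m (pvRunBit h)) mask0
  (PySem.List.pyRange 0 3 1).any (fun i => Int.land (mask >>> (3*i).toNat) 7 == 7)

-- ===== PRECONDITION & SPEC =====
-- Pre_ excludes exactly the inputs where the Python A raises IndexError: a meld that is empty,
-- or whose tiles at the indices pai2onlyno actually reads (4/3/2/1 of them by meld length) are empty.
def Pre_yiqiguantong (hand : List (List (List Int))) (openHand : List (List (List Int))) : Prop :=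
  ∀ h ∈ hand ++ openHand, h ≠ [] ∧
    ∀ t ∈ h.take (if h.length = 4 then 4 else if h.length = 3 then 3 else if h.length = 2 then 2 else 1),
      t ≠ []
instance (hand : List (List (List Int))) (openHand : List (List (List Int))) : Decidable (Pre_yiqiguantong hand openHand) := by unfold Pre_yiqiguantong; infer_instance

def pvWitness_yiqiguantong : List (List (List Int)) × List (List (List Int)) :=
  ([[[0],[1],[2]], [[3],[4],[5]], [[6],[7],[8]], [[9],[9]]], [[[20]]])

def Spec_yiqiguantong (hand : List (List (List Int))) (openHand : List (List (List Int))) (out : Bool) : Prop := out = yiqiguantong_alt hand openHand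
instance (hand : List (List (List Int))) (openHand : List (List (List Int))) (out : Bool) : Decidable (Spec_yiqiguantong hand openHand out) := by unfold Spec_yiqiguantong; infer_instance

-- ===== CLAIM (what is proved, stated in full; the proofs are below) =====
def Claim_equal_yiqiguantong : Prop := ∀ (hand : List (List (List Int))) (openHand : List (List (List Int))), Dom_yiqiguantong hand openHand → Pre_yiqiguantong hand openHand → Spec_yiqiguantong hand openHand (yiqiguantong hand openHand)

-- ===== LEMMAS AND PROOFS =====

-- common characterisation: some meld of ms has exactly 3 tiles with first numbers [a, a+1, a+2]
def pvHasRun (ms : List (List (List Int))) (a : Int) : Prop :=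
  ∃ h ∈ ms, h.length = 3 ∧ pvAt h 0 = a ∧ pvAt h 1 = a + 1 ∧ pvAt h 2 = a + 2

-- ---- A side ----

lemma foldl_append_singleton {α β : Type} (g : α → β) (ms : List α) (acc : List β) :
    ms.foldl (fun acc h => acc ++ [g h]) acc = acc ++ ms.map g := by
  induction ms generalizing acc <;> simp [*]

lemma pai2onlyno_contains (ms : List (List (List Int))) (a : Int) :
    (pai2onlyno ms).contains [a, a + 1, a + 2] = true ↔ pvHasRun ms a := by
  unfold pai2onlyno pvHasRun
  rw [foldl_append_singleton]
  simp only [List.nil_append, List.contains_eq_mem, List.mem_map, decide_eq_true_eq]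
  constructor
  · rintro ⟨h, hm, he⟩
    refine ⟨h, hm, ?_⟩
    by_cases h4 : h.length = 4 <;> by_cases h3 : h.length = 3 <;> by_cases h2 : h.length = 2 <;>
      simp_all
  · rintro ⟨h, hm, hl, h0, h1, h2⟩
    exact ⟨h, hm, by simp [hl, h0, h1, h2]⟩

-- one unrolled step of A's outer loop
lemma pvRonStep (hn on : List (List Int)) (i : Int) (rest : List Int) :
    pvRonLoop hn on (i :: rest) =
      (((hn.contains [0+i*9,1+i*9,2+i*9] || on.contains [0+i*9,1+i*9,2+i*9]) &&
        (hn.contains [3+i*9,4+i*9,5+i*9] || on.contains [3+i*9,4+i*9,5+i*9]) &&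
        (hn.contains [6+i*9,7+i*9,8+i*9] || on.contains [6+i*9,7+i*9,8+i*9])) ||
       pvRonLoop hn on rest) := by
  by_cases hc0 : ([i*9, 1+i*9, 2+i*9] ∈ hn ∨ [i*9, 1+i*9, 2+i*9] ∈ on) <;>
  by_cases hc1 : ([3+i*9, 4+i*9, 5+i*9] ∈ hn ∨ [3+i*9, 4+i*9, 5+i*9] ∈ on) <;>
  by_cases hc2 : ([6+i*9, 7+i*9, 8+i*9] ∈ hn ∨ [6+i*9, 7+i*9, 8+i*9] ∈ on) <;>
    simp [pvRonLoop, PySem.List.enumerate, hc0, hc1, hc2, PySem.List.pySetD, PySem.List.pySet?,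
          PySem.List.pyIdx?]

lemma contains_append_run (hand openHand : List (List (List Int))) (a : Int) :
    ((pai2onlyno hand).contains [a, a+1, a+2] || (pai2onlyno openHand).contains [a, a+1, a+2]) = true ↔
      pvHasRun (hand ++ openHand) a := by
  rw [Bool.or_eq_true, pai2onlyno_contains, pai2onlyno_contains]
  unfold pvHasRun
  constructor
  · rintro (⟨h, hm, rest⟩ | ⟨h, hm, rest⟩)
    · exact ⟨h, List.mem_append_left _ hm, rest⟩
    · exact ⟨h, List.mem_append_right _ hm, rest⟩
  · rintro ⟨h, hm, rest⟩
    rcases List.mem_append.mp hm with hm | hm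
    · exact Or.inl ⟨h, hm, rest⟩
    · exact Or.inr ⟨h, hm, rest⟩

-- ---- B side: the Int mask is the cast of a Nat mask, whose bits are run presences ----

def natRunBit (h : List (List Int)) : Nat :=
  if h.length == 3 then
    if decide (0 ≤ pvAt h 0) && decide (pvAt h 0 ≤ 24) && (PySem.Int.mod (pvAt h 0) 3 == 0)
        && (pvAt h 1 == pvAt h 0 + 1) && (pvAt h 2 == pvAt h 0 + 2) then
      1 <<< (PySem.Int.floordiv (pvAt h 0) 3).toNat
    else 0
  else 0

lemma pvRunBit_eq_ofNat (h : List (List Int)) : pvRunBit h = Int.ofNat (natRunBit h) := by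
  unfold pvRunBit natRunBit
  split_ifs <;> rfl

lemma foldl_lor_ofNat (ms : List (List (List Int))) (n : Nat) :
    ms.foldl (fun m h => Int.lor m (pvRunBit h)) (Int.ofNat n) =
      Int.ofNat (ms.foldl (fun m h => m ||| natRunBit h) n) := by
  induction ms generalizing n with
  | nil => rfl
  | cons h t ih =>
    rw [List.foldl_cons, List.foldl_cons, pvRunBit_eq_ofNat]
    exact ih (n ||| natRunBit h)

lemma foldl_lor_zero (ms : List (List (List Int))) :
    ms.foldl (fun m h => Int.lor m (pvRunBit h)) (0:Int) =
      Int.ofNat (ms.foldl (fun m h => m ||| natRunBit h) 0) := foldl_lor_ofNat ms 0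

lemma natRunBit_lt (h : List (List Int)) : natRunBit h < 512 := by
  unfold natRunBit
  split_ifs with h3 hg
  · simp only [Bool.and_eq_true, decide_eq_true_eq, beq_iff_eq] at hg
    obtain ⟨⟨⟨⟨hge, hle⟩, _⟩, _⟩, _⟩ := hg
    have hj : (PySem.Int.floordiv (pvAt h 0) 3).toNat ≤ 8 := by
      rw [PySem.Int.floordiv_eq_ediv_of_pos (b:=3) (by norm_num)]
      omega
    calc 1 <<< (PySem.Int.floordiv (pvAt h 0) 3).toNat = 2 ^ (PySem.Int.floordiv (pvAt h 0) 3).toNat := by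
          rw [Nat.shiftLeft_eq]; ring
      _ ≤ 2 ^ 8 := Nat.pow_le_pow_right (by norm_num) hj
      _ < 512 := by norm_num
  · norm_num
  · norm_num

lemma foldl_lor_lt (ms : List (List (List Int))) (n : Nat) (hn : n < 512) :
    ms.foldl (fun m h => m ||| natRunBit h) n < 512 := by
  induction ms generalizing n with
  | nil => exact hn
  | cons h t ih =>
    exact ih _ (by
      have h1 := natRunBit_lt h
      have : (512 : Nat) = 2 ^ 9 := by norm_num
      rw [this] at hn h1 ⊢
      exact Nat.bitwise_lt_two_pow hn h1)

-- bit k of the meld's run-bit, for k ≤ 8: exactly "this meld is the run [3k, 3k+1, 3k+2]"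
lemma natRunBit_testBit (h : List (List Int)) (k : Nat) (hk : k ≤ 8) :
    (natRunBit h).testBit k = true ↔
      h.length = 3 ∧ pvAt h 0 = 3*(k:Int) ∧ pvAt h 1 = 3*(k:Int) + 1 ∧ pvAt h 2 = 3*(k:Int) + 2 := by
  unfold natRunBit
  split_ifs with h3 hg
  · simp only [beq_iff_eq] at h3
    simp only [Bool.and_eq_true, decide_eq_true_eq, beq_iff_eq] at hg
    obtain ⟨⟨⟨⟨hge, hle⟩, hm⟩, h1⟩, h2⟩ := hg
    rw [PySem.Int.mod_eq_emod_of_pos (b:=3) (by norm_num)] at hm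
    rw [Nat.shiftLeft_eq, one_mul, Nat.testBit_two_pow]
    rw [PySem.Int.floordiv_eq_ediv_of_pos (b:=3) (by norm_num)]
    constructor
    · intro he
      have : pvAt h 0 = 3*(k:Int) := by
        have := of_decide_eq_true he
        omega
      exact ⟨h3, this, by omega, by omega⟩
    · rintro ⟨_, h0, _, _⟩
      exact decide_eq_true (by omega)
  · simp only [beq_iff_eq] at h3
    simp only [Bool.and_eq_true, decide_eq_true_eq, beq_iff_eq] at hg
    rw [PySem.Int.mod_eq_emod_of_pos (b:=3) (by norm_num)] at hg
    simp only [Nat.zero_testBit, Bool.false_eq_true, false_iff]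
    rintro ⟨_, h0, h1, h2⟩
    exact hg ⟨⟨⟨⟨by omega, by omega⟩, by omega⟩, by omega⟩, by omega⟩
  · simp only [beq_iff_eq] at h3
    simp only [Nat.zero_testBit, Bool.false_eq_true, false_iff]
    rintro ⟨hl, _⟩
    exact h3 hl
lemma testBit_foldl_lor (ms : List (List (List Int))) (n : Nat) (k : Nat) :
    (ms.foldl (fun m h => m ||| natRunBit h) n).testBit k =
      (n.testBit k || ms.any (fun h => (natRunBit h).testBit k)) := by
  induction ms generalizing n with
  | nil => simp
  | cons h t ih =>
    simp only [List.foldl_cons, List.any_cons, ih, Nat.testBit_lor]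
    rw [Bool.or_assoc]

-- bit k of the whole mask, for k ≤ 8, is the presence of run [3k, 3k+1, 3k+2]
lemma mask_testBit (hand openHand : List (List (List Int))) (k : Nat) (hk : k ≤ 8) :
    ((hand ++ openHand).foldl (fun m h => m ||| natRunBit h) 0).testBit k = true ↔
      pvHasRun (hand ++ openHand) (3*(k:Int)) := by
  rw [testBit_foldl_lor]
  unfold pvHasRun
  simp only [Nat.zero_testBit, Bool.false_or, List.any_eq_true]
  constructor
  · rintro ⟨h, hm, hb⟩
    exact ⟨h, hm, (natRunBit_testBit h k hk).mp hb⟩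
  · rintro ⟨h, hm, hb⟩
    exact ⟨h, hm, (natRunBit_testBit h k hk).mpr hb⟩

-- the arithmetic per-suit check of a 9-bit mask, read off bit by bit (512-case kernel check)
set_option maxRecDepth 20000 in
lemma pvBitCheck : ∀ n : Nat, n < 512 →
    ((Int.land ((Int.ofNat n) >>> (0:Nat)) 7 = 7) ∨ (Int.land ((Int.ofNat n) >>> (3:Nat)) 7 = 7) ∨
     (Int.land ((Int.ofNat n) >>> (6:Nat)) 7 = 7) ↔
      (n.testBit 0 = true ∧ n.testBit 1 = true ∧ n.testBit 2 = true) ∨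
      (n.testBit 3 = true ∧ n.testBit 4 = true ∧ n.testBit 5 = true) ∨
      (n.testBit 6 = true ∧ n.testBit 7 = true ∧ n.testBit 8 = true)) := by decide

set_option maxHeartbeats 400000 in
theorem yiqiguantong_eq (hand openHand : List (List (List Int))) :
    yiqiguantong hand openHand = yiqiguantong_alt hand openHand := by
  unfold yiqiguantong yiqiguantong_alt
  rw [show PySem.List.pyRange 0 3 1 = [0, 1, 2] from by decide]
  rw [pvRonStep, pvRonStep, pvRonStep]
  simp only []
  rw [← List.foldl_append, foldl_lor_zero]
  set n := (hand ++ openHand).foldl (fun m h => m ||| natRunBit h) 0 with hn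
  have hlt : n < 512 := by rw [hn]; exact foldl_lor_lt _ 0 (by norm_num)
  clear_value n
  rw [Bool.eq_iff_iff]
  simp only [pvRonLoop, List.any_cons, List.any_nil, Bool.or_eq_true, Bool.and_eq_true,
    Bool.or_false, beq_iff_eq]
  rw [show ((3 * (0:Int)).toNat) = 0 from by decide, show ((3 * (1:Int)).toNat) = 3 from by decide,
      show ((3 * (2:Int)).toNat) = 6 from by decide]
  have hbc := pvBitCheck n hlt
  have hb0 := mask_testBit hand openHand 0 (by norm_num)
  have hb1 := mask_testBit hand openHand 1 (by norm_num)
  have hb2 := mask_testBit hand openHand 2 (by norm_num)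
  have hb3 := mask_testBit hand openHand 3 (by norm_num)
  have hb4 := mask_testBit hand openHand 4 (by norm_num)
  have hb5 := mask_testBit hand openHand 5 (by norm_num)
  have hb6 := mask_testBit hand openHand 6 (by norm_num)
  have hb7 := mask_testBit hand openHand 7 (by norm_num)
  have hb8 := mask_testBit hand openHand 8 (by norm_num)
  rw [← hn] at hb0 hb1 hb2 hb3 hb4 hb5 hb6 hb7 hb8
  norm_num at hb0 hb1 hb2 hb3 hb4 hb5 hb6 hb7 hb8
  norm_num at hbc
  have e : ∀ a : Int, (((pai2onlyno hand).contains [a, a+1, a+2] = true) ∨ ((pai2onlyno openHand).contains [a, a+1, a+2] = true)) ↔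
      pvHasRun (hand ++ openHand) a := by
    intro a
    rw [← contains_append_run hand openHand a, Bool.or_eq_true]
  have e0 := e 0; have e3 := e 3; have e6 := e 6; have e9 := e 9; have e12 := e 12
  have e15 := e 15; have e18 := e 18; have e21 := e 21; have e24 := e 24
  norm_num at e0 e3 e6 e9 e12 e15 e18 e21 e24 ⊢
  rw [e0, e3, e6, e9, e12, e15, e18, e21, e24]
  rw [hbc, hb0, hb1, hb2, hb3, hb4, hb5, hb6, hb7, hb8]
  simp only [and_assoc]

-- ===== VERDICT (by name: the statement is the Claim_ definition above) =====
theorem yiqiguantong_spec : Claim_equal_yiqiguantong := by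
  intro hand openHand _ _
  unfold Spec_yiqiguantong
  exact yiqiguantong_eq hand openHand
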